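-- pv_equiv track=rewrite | github.com/Rakesh-infosrc/clara-V2 | backend/src/tools/employee_details.py | _alias_hit
-- ===== SOURCE A (Python) =====
-- FIELD_ALIASES: dict[str, set[str]] = {
--     "name": {"name", "full_name", "employee_name", "first_name", "last_name"},
--     "employee_id": {"employee_id", "id", "emp_id"},
--     "email": {"email", "email_address", "mail"},
--     "phone": {"phone", "mobile", "phone_number", "contact", "contact_number"},
--     "department": {"department", "dept", "team"},
--     "role": {"role", "employee_role", "designation", "title", "position"},
--     "date_of_joining": {"date_of_joining", "doj", "joining_date", "join_date", "datejoined"},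
--     "location": {"location", "office", "site"},
--     "manager": {"manager", "report_manager", "reporting_manager", "reporting to", "reports to", "report_to", "supervisor", "lead"},
--     "status": {"status", "employment_status"},
-- }
--
-- def _norm(s: str) -> str:
--     return "".join(ch.lower() for ch in (s or "") if ch.isalnum())
--
-- def _alias_hit(req: str, key: str) -> bool:
--     nreq = _norm(req)
--     nkey = _norm(key)
--     if not nreq or not nkey:
--         return False
--     if nreq == nkey or nreq in nkey or nkey in nreq:
--         return True
--     for canon, aliases in FIELD_ALIASES.items():
--         if nreq == _norm(canon) or nreq in {_norm(a) for a in aliases}: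
--             if nkey == _norm(canon) or nkey in {_norm(a) for a in aliases}:
--                 return True
--     return False
-- ===== SOURCE B (Python) =====
-- FIELD_ALIASES: dict[str, set[str]] = {
--     "name": {"name", "full_name", "employee_name", "first_name", "last_name"},
--     "employee_id": {"employee_id", "id", "emp_id"},
--     "email": {"email", "email_address", "mail"},
--     "phone": {"phone", "mobile", "phone_number", "contact", "contact_number"},
--     "department": {"department", "dept", "team"},
--     "role": {"role", "employee_role", "designation", "title", "position"},
--     "date_of_joining": {"date_of_joining", "doj", "joining_date", "join_date", "datejoined"},
--     "location": {"location", "office", "site"},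
--     "manager": {"manager", "report_manager", "reporting_manager", "reporting to", "reports to", "report_to", "supervisor", "lead"},
--     "status": {"status", "employment_status"},
-- }
--
-- def _norm(s: str) -> str:
--     return "".join(ch.lower() for ch in (s or "") if ch.isalnum())
--
-- # Inverted index built ONCE: normalized token -> set of canonical field groups containing it.
-- _INDEX: dict[str, set[str]] = {}
-- for _canon, _aliases in FIELD_ALIASES.items():
--     for _tok in {_canon} | _aliases:
--         _INDEX.setdefault(_norm(_tok), set()).add(_canon)
--
-- def _alias_hit(req: str, key: str) -> bool:
--     nreq = _norm(req)
--     nkey = _norm(key)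
--     if not nreq or not nkey:
--         return False
--     if nreq == nkey or nreq in nkey or nkey in nreq:
--         return True
--     return not _INDEX.get(nreq, set()).isdisjoint(_INDEX.get(nkey, set()))
-- ===== Notes on version B (the rewrite author's own statement) =====
-- stated objective: alternative
-- what changed: Replaces the per-call nested scan over FIELD_ALIASES groups (re-normalizing every alias on each call) with an inverted index built once (normalized token -> set of canonical groups); the hit test becomes two lookups plus a set-disjointness check.
import Mathlib
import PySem

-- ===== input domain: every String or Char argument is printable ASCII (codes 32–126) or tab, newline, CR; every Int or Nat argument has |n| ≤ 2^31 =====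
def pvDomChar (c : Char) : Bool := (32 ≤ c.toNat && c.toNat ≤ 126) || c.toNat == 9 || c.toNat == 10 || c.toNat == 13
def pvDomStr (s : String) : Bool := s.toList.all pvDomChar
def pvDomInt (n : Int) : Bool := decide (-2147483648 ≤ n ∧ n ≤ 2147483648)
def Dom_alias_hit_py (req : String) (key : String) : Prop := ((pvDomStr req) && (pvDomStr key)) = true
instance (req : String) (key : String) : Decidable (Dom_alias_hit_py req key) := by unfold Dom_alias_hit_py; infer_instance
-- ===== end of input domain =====

-- B replaces A's per-call nested scan over alias groups with an inverted index
-- (normalized token -> set of canonical groups) built once; two lookups + a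
-- disjointness test replace the loop. Same result on every input (proved below).


-- ===== PORT A =====
-- FIELD_ALIASES, in dict insertion order (alias sets as lists; only membership is used)
def pvTable : List (String × List String) :=
  [ ("name", ["name", "full_name", "employee_name", "first_name", "last_name"]),
    ("employee_id", ["employee_id", "id", "emp_id"]),
    ("email", ["email", "email_address", "mail"]),
    ("phone", ["phone", "mobile", "phone_number", "contact", "contact_number"]),
    ("department", ["department", "dept", "team"]),
    ("role", ["role", "employee_role", "designation", "title", "position"]),
    ("date_of_joining", ["date_of_joining", "doj", "joining_date", "join_date", "datejoined"]),
    ("location", ["location", "office", "site"]),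
    ("manager", ["manager", "report_manager", "reporting_manager", "reporting to", "reports to", "report_to", "supervisor", "lead"]),
    ("status", ["status", "employment_status"]) ]

-- _norm: keep lowered alphanumeric chars; ('s or ""' = s for strings: "" stays "")
def pvNorm (s : String) : List Char :=
  (s.toList.filter PySem.Chars.isalnum).map PySem.Chars.lowerChar

-- the for-loop of A with its early return
def pvLoopA (nreq nkey : List Char) : List (String × List String) → Bool
  | [] => false
  | (canon, aliases) :: rest =>
      if nreq == pvNorm canon || (aliases.map pvNorm).contains nreq then
        if nkey == pvNorm canon || (aliases.map pvNorm).contains nkey then true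
        else pvLoopA nreq nkey rest
      else pvLoopA nreq nkey rest

def alias_hit_py (req : String) (key : String) : Bool :=
  let nreq := pvNorm req
  let nkey := pvNorm key
  if nreq.isEmpty || nkey.isEmpty then false
  else if nreq == nkey || PySem.Chars.isIn nreq nkey || PySem.Chars.isIn nkey nreq then true
  else pvLoopA nreq nkey pvTable

-- ===== PORT B =====
-- the one-time index build: for each group, for each token in {canon} ∪ aliases,
-- _INDEX.setdefault(_norm(tok), set()).add(canon)
def pvIndex : PySem.Dict (List Char) (List String) :=
  pvTable.foldl
    (fun d p =>
      (PySem.Set.ofList (p.1 :: p.2)).foldl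
        (fun d tok => d.modify (pvNorm tok) [] (fun s => PySem.Set.add s p.1)) d)
    PySem.Dict.empty

def alias_hit_py_alt (req : String) (key : String) : Bool :=
  let nreq := pvNorm req
  let nkey := pvNorm key
  if nreq.isEmpty || nkey.isEmpty then false
  else if nreq == nkey || PySem.Chars.isIn nreq nkey || PySem.Chars.isIn nkey nreq then true
  else
    -- not _INDEX.get(nreq, set()).isdisjoint(_INDEX.get(nkey, set()))
    (pvIndex.getD nreq []).any (fun c => (pvIndex.getD nkey []).contains c)

-- ===== PRECONDITION & SPEC =====
def Spec_alias_hit_py (req : String) (key : String) (out : Bool) : Prop := out = alias_hit_py_alt req key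
instance (req : String) (key : String) (out : Bool) : Decidable (Spec_alias_hit_py req key out) := by unfold Spec_alias_hit_py; infer_instance

-- ===== CLAIM (what is proved, stated in full; the proofs are below) =====
def Claim_equal_alias_hit_py : Prop := ∀ (req : String) (key : String), Dom_alias_hit_py req key → Spec_alias_hit_py req key (alias_hit_py req key)

-- ===== LEMMAS AND PROOFS =====

-- membership of a token in one group's check, as A writes it
def pvHit (t : List Char) (p : String × List String) : Bool :=
  t == pvNorm p.1 || (p.2.map pvNorm).contains t

-- A's early-return loop is the "any group contains both" predicate
theorem pvLoopA_eq_any (nreq nkey : List Char) (l : List (String × List String)) :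
    pvLoopA nreq nkey l = l.any (fun p => pvHit nreq p && pvHit nkey p) := by
  induction l with
  | nil => rfl
  | cons p rest ih =>
    obtain ⟨c, as⟩ := p
    have step : pvLoopA nreq nkey ((c, as) :: rest)
        = ((pvHit nreq (c, as) && pvHit nkey (c, as)) || pvLoopA nreq nkey rest) := by
      simp only [pvLoopA, pvHit]
      by_cases h1 : (nreq == pvNorm c || (as.map pvNorm).contains nreq) = true
      · rw [if_pos h1, h1]
        by_cases h2 : (nkey == pvNorm c || (as.map pvNorm).contains nkey) = true
        · rw [if_pos h2, h2]; simp
        · rw [if_neg h2, (Bool.not_eq_true _).mp h2]; simp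
      · rw [if_neg h1, (Bool.not_eq_true _).mp h1]; simp
    rw [step, ih, List.any_cons]

-- one group's inner token fold: what ends up under key t
theorem pvFoldTok_getD_contains (c0 : String) (toks : List String)
    (d : PySem.Dict (List Char) (List String)) (t : List Char) (c : String) :
    ((toks.foldl (fun d tok => d.modify (pvNorm tok) [] (fun s => PySem.Set.add s c0)) d).getD t []).contains c
      = ((d.getD t []).contains c || (c == c0 && (toks.map pvNorm).contains t)) := by
  induction toks generalizing d with
  | nil => simp
  | cons tok rest ih =>
    simp only [List.foldl_cons, ih, PySem.Dict.getD_modify, List.map_cons, List.contains_cons]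
    by_cases ht : t = pvNorm tok
    · subst ht
      rw [if_pos rfl]
      by_cases hc : c = c0
      · subst hc; simp [PySem.Set.mem_add]
      · have h0 : (c == c0) = false := beq_eq_false_iff_ne.mpr hc
        simp [PySem.Set.mem_add, h0, hc]
    · rw [if_neg ht]
      have h0 : (t == pvNorm tok) = false := beq_eq_false_iff_ne.mpr ht
      simp [h0]

-- the whole index: c is under key t iff some listed group with canon c contains t
theorem pvIndex_getD_contains (t : List Char) (c : String) :
    ((pvIndex.getD t []).contains c) = pvTable.any (fun p => p.1 == c && pvHit t p) := by
  have main : ∀ (l : List (String × List String)) (d : PySem.Dict (List Char) (List String)),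
      (((l.foldl (fun d p => (PySem.Set.ofList (p.1 :: p.2)).foldl
          (fun d tok => d.modify (pvNorm tok) [] (fun s => PySem.Set.add s p.1)) d) d).getD t []).contains c)
        = ((d.getD t []).contains c || l.any (fun p => p.1 == c && pvHit t p)) := by
    intro l
    induction l with
    | nil => simp
    | cons p rest ih =>
      intro d
      obtain ⟨c0, as⟩ := p
      simp only [List.foldl_cons, ih, pvFoldTok_getD_contains, List.any_cons]
      have htok : ((PySem.Set.ofList (c0 :: as)).map pvNorm).contains t
          = (t == pvNorm c0 || (as.map pvNorm).contains t) := by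
        rw [Bool.eq_iff_iff]
        simp only [List.contains_eq_mem, List.mem_map, PySem.Set.mem_ofList, List.mem_cons,
          Bool.or_eq_true, beq_iff_eq, decide_eq_true_eq]
        constructor
        · rintro ⟨x, hx | hx, rfl⟩
          · exact Or.inl (by rw [hx])
          · exact Or.inr ⟨x, hx, rfl⟩
        · rintro (h | ⟨x, hx, h⟩)
          · exact ⟨c0, Or.inl rfl, h.symm⟩
          · exact ⟨x, Or.inr hx, h⟩
      rw [htok]
      show _ = (_ || ((c0 == c && pvHit t (c0, as)) || _))
      rw [pvHit]
      rw [Bool.beq_comm, Bool.or_assoc]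
  have := main pvTable PySem.Dict.empty
  simpa [pvIndex] using this

-- canonical keys of the table are distinct
theorem pvTable_keys_nodup : (pvTable.map Prod.fst).Nodup := by decide

-- the nested-scan predicate equals the intersection test on the index
theorem pv_core (nreq nkey : List Char) :
    pvLoopA nreq nkey pvTable
      = (pvIndex.getD nreq []).any (fun c => (pvIndex.getD nkey []).contains c) := by
  rw [pvLoopA_eq_any, Bool.eq_iff_iff]
  simp only [List.any_eq_true, Bool.and_eq_true]
  constructor
  · rintro ⟨p, hp, h1, h2⟩
    refine ⟨p.1, ?_, ?_⟩
    · rw [show (p.1 ∈ pvIndex.getD nreq []) ↔ _ from (List.contains_iff_mem).symm, pvIndex_getD_contains nreq p.1]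
      simp only [List.any_eq_true, Bool.and_eq_true]
      exact ⟨p, hp, by simp, h1⟩
    · rw [pvIndex_getD_contains nkey p.1]
      simp only [List.any_eq_true, Bool.and_eq_true]
      exact ⟨p, hp, by simp, h2⟩
  · rintro ⟨c, hc1, hc2⟩
    rw [show (c ∈ pvIndex.getD nreq []) ↔ _ from (List.contains_iff_mem).symm, pvIndex_getD_contains nreq c] at hc1
    rw [pvIndex_getD_contains nkey c] at hc2
    simp only [List.any_eq_true, Bool.and_eq_true, beq_iff_eq] at hc1 hc2
    obtain ⟨p, hp, hpc, hp1⟩ := hc1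
    obtain ⟨q, hq, hqc, hq2⟩ := hc2
    have hpq : p = q :=
      List.inj_on_of_nodup_map pvTable_keys_nodup hp hq (hpc.trans hqc.symm)
    exact ⟨p, hp, hp1, hpq ▸ hq2⟩

-- ===== VERDICT (by name: the statement is the Claim_ definition above) =====
theorem alias_hit_py_spec : Claim_equal_alias_hit_py := by
  intro req key _
  unfold Spec_alias_hit_py
  simp only [alias_hit_py, alias_hit_py_alt, pv_core]
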